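-- pv_equiv track=rewrite | github.com/guzev/Tasks-on-Python | firstTask.py | answer
-- ===== SOURCE A (Python) =====
-- def answer(N):
--     def init_list_of_objects(size):
--         list_of_objects = list()
--         for i in range(0,size):
--             list_of_objects.append( list() )
--         return list_of_objects
--
--     main_array = init_list_of_objects(18)
--     squares = [1, 2, 4, 8, 16, 32, 64, 128, 256, 512, 1024, 2048, 4096, 8192, 16384, 32768, 65536, 131072]
--
--     counter_of_one = [0, 1, 1, 2]
--
--
--     ref_to_counter_of_one = 1
--     ref_to_squares = 2
--     k = 1
--     for i in range(2, 18):
--         if (N >= squares[i]):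
--             k = k + 1
--         else:
--             break
--     result = []
--     if (N <= 3):
--         for i in range(0, N):
--             result.append(i)
--         return result
--     else:
--         result = [0]
--         main_array[1].append(1)
--         main_array[1].append(2)
--         main_array[2].append(3)
--         for i in range(4, N):
--             if (i == squares[ref_to_squares]):
--                 ref_to_counter_of_one = 1
--                 counter_of_one.append(1)
--                 main_array[1].append(i)
--                 ref_to_squares = ref_to_squares + 1
--             else:
--                 counter_of_one.append(1 + counter_of_one[ref_to_counter_of_one])
--                 main_array[1 + counter_of_one[ref_to_counter_of_one]].append(i)
--                 ref_to_counter_of_one = ref_to_counter_of_one + 1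
--
--
--     for i in range(1, k + 1):
--         for j in main_array[i]:
--             result.append(j)
--
--     return result
-- ===== SOURCE B (Python) =====
-- def answer(N):
--     return sorted(range(N), key=lambda i: bin(i).count("1"))
-- ===== Notes on version B (the rewrite author's own statement) =====
-- stated objective: simpler
-- what changed: Replaces the hand-rolled 18-bucket machinery with incremental popcount recurrences and power-of-two resets by a one-line stable sort of range(N) keyed on each number's popcount.
import Mathlib
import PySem

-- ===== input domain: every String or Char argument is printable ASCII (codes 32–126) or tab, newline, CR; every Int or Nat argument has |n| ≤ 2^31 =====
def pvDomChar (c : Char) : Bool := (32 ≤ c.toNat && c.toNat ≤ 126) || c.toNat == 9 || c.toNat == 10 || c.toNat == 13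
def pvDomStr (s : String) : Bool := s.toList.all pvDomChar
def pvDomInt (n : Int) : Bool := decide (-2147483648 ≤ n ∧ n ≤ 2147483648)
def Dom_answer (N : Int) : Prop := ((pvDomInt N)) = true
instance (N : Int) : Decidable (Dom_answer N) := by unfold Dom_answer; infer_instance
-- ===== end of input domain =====

-- B replaces A's hand-rolled popcount-bucket machinery by one stable sort of range(N)
-- keyed on the popcount (objective: simpler; not faster).

-- ===== PORT A =====
-- the literal `squares` list of A
def pvSquares : List Int :=
  [1, 2, 4, 8, 16, 32, 64, 128, 256, 512, 1024, 2048, 4096, 8192, 16384, 32768, 65536, 131072]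

-- `main_array[idx].append(v)`; every idx A uses is nonnegative and < 18 on inputs Pre_ admits,
-- so `.toNat`/`getD` never see an out-of-range index there
def pvAppendAt (xs : List (List Int)) (idx : Int) (v : Int) : List (List Int) :=
  xs.set idx.toNat ((xs.getD idx.toNat []) ++ [v])

-- `for i in range(2, 18): if N >= squares[i]: k += 1 else: break`  (break = stop recursing)
def answerKLoop (N : Int) (squares : List Int) (k : Int) : List Int → Int
  | [] => k
  | i :: rest =>
      if PySem.List.pyGetD squares i 0 ≤ N then answerKLoop N squares (k + 1) rest else k

-- one iteration of A's main loop; state = (main_array, counter_of_one, ref_to_counter_of_one, ref_to_squares).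
-- `squares[ref_to_squares]` / `counter_of_one[ref]` are read with pyGetD; under Pre_ they are always in range
def answerStep (squares : List Int) (st : List (List Int) × List Int × Int × Int) (i : Int) :
    List (List Int) × List Int × Int × Int :=
  match st with
  | (ma, c, refC, refS) =>
    if i = PySem.List.pyGetD squares refS 0 then
      (pvAppendAt ma 1 i, c ++ [1], 1, refS + 1)
    else
      (pvAppendAt ma (1 + PySem.List.pyGetD c refC 0) i,
       c ++ [1 + PySem.List.pyGetD c refC 0], refC + 1, refS)

def answer (N : Int) : List Int :=
  -- init_list_of_objects(18)
  let mainArray : List (List Int) := (List.range 18).foldl (fun acc _ => acc ++ [([] : List Int)]) []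
  let k : Int := answerKLoop N pvSquares 1 (PySem.List.pyRange 2 18)
  if N ≤ 3 then
    PySem.List.pyRange 0 N
  else
    -- result = [0]; main_array[1] += [1, 2]; main_array[2] += [3]
    let ma1 := pvAppendAt (pvAppendAt (pvAppendAt mainArray 1 1) 1 2) 2 3
    let st := (PySem.List.pyRange 4 N).foldl (answerStep pvSquares) (ma1, [0, 1, 1, 2], 1, 2)
    (PySem.List.pyRange 1 (k + 1)).foldl (fun r i => r ++ PySem.List.pyGetD st.1 i []) [0]

-- ===== PORT B =====
-- sorted(range(N), key=lambda i: bin(i).count("1")); bin(i).count("1") = PySem.Int.bitCount i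
def answer_alt (N : Int) : List Int :=
  PySem.List.sorted (PySem.List.pyRange 0 N) (fun i => PySem.Int.bitCount i)

-- ===== PRECONDITION & SPEC =====
-- For N ≥ 131074 A raises IndexError (its squares table stops at 2^17 = 131072 and
-- `squares[ref_to_squares]` runs off the end); Pre_ excludes exactly those inputs.
def Pre_answer (N : Int) : Prop := N ≤ 131073
instance (N : Int) : Decidable (Pre_answer N) := by unfold Pre_answer; infer_instance

def pvWitness_answer : Int := 20

def Spec_answer (N : Int) (out : List Int) : Prop := out = answer_alt N
instance (N : Int) (out : List Int) : Decidable (Spec_answer N out) := by unfold Spec_answer; infer_instance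

-- ===== CLAIM (what is proved, stated in full; the proofs are below) =====
def Claim_equal_answer : Prop := ∀ (N : Int), Dom_answer N → Pre_answer N → Spec_answer N (answer N)

-- ===== LEMMAS AND PROOFS =====

-- popcount on Nat (what bitCount computes on casts of naturals)
def pcN (n : Nat) : Nat := PySem.Int.bitCount (n : Int)

-- the sublist of 0..M-1 whose popcount is b, in increasing order
def bucketL (M b : Nat) : List Int :=
  ((List.range M).filter (fun n => pcN n == b)).map (fun (n : Nat) => (n : Int))

-- counter_of_one after the loop has processed 4..M-1 (M ≥ 4)
def cOf (M : Nat) : List Int := (List.range M).map (fun n => (pcN n : Int))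

-- main_array after the loop has processed 4..M-1 (M ≥ 4): bucket 0 stays empty (0 is not inserted)
def maOf (M : Nat) : List (List Int) :=
  (List.range 18).map (fun b => if b = 0 then [] else bucketL M b)

-- the full loop state right before processing i = M
def stOf (M : Nat) : List (List Int) × List Int × Int × Int :=
  (maOf M, cOf M,
   if M = 4 then 1 else (M : Int) - 2 ^ (Nat.log 2 (M - 1)),
   ((Nat.log 2 (M - 1) + 1 : Nat) : Int))

-- pcN facts ---------------------------------------------------------------

lemma pcN_zero : pcN 0 = 0 := by decide

lemma pcN_rec (n : Nat) (h : 0 < n) : pcN n = n % 2 + pcN (n / 2) :=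
  PySem.Int.bitCount_natCast h

lemma pcN_pow (m : Nat) : pcN (2 ^ m) = 1 := by
  induction m with
  | zero => decide
  | succ m ih =>
      rw [pcN_rec _ (by positivity)]
      have h2 : 2 ^ (m + 1) % 2 = 0 := by
        simp [Nat.pow_succ, Nat.mul_mod_left]
      have h3 : 2 ^ (m + 1) / 2 = 2 ^ m := by
        rw [Nat.pow_succ, Nat.mul_div_cancel]
        omega
      rw [h2, h3, ih]

lemma pcN_add_pow (L : Nat) : ∀ r : Nat, r < 2 ^ L → pcN (2 ^ L + r) = 1 + pcN r := by
  induction L with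
  | zero =>
      intro r hr
      interval_cases r
      decide
  | succ L ih =>
      intro r hr
      rw [pcN_rec _ (by positivity)]
      have h1 : (2 ^ (L + 1) + r) % 2 = r % 2 := by
        omega
      have h2 : (2 ^ (L + 1) + r) / 2 = 2 ^ L + r / 2 := by
        rw [Nat.pow_succ] at *
        omega
      rw [h1, h2, ih (r / 2) (by omega)]
      rcases Nat.eq_zero_or_pos r with h | h
      · subst h; simp
      · rw [pcN_rec r h]; omega

lemma pcN_le (m : Nat) : ∀ r : Nat, r < 2 ^ m → pcN r ≤ m := by
  induction m with
  | zero => intro r hr; interval_cases r; decide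
  | succ m ih =>
      intro r hr
      rcases Nat.eq_zero_or_pos r with h | h
      · subst h; simp [pcN_zero]
      · rw [pcN_rec r h]
        have := ih (r / 2) (by rw [Nat.pow_succ] at hr; omega)
        omega

lemma pcN_le_pred (m : Nat) : ∀ r : Nat, r < 2 ^ (m + 1) - 1 → pcN r ≤ m := by
  induction m with
  | zero => intro r hr; interval_cases r; decide
  | succ m ih =>
      intro r hr
      rcases Nat.eq_zero_or_pos r with h | h
      · subst h; simp [pcN_zero]
      · rw [pcN_rec r h]
        rcases Nat.even_or_odd r with he | ho
        · have h2 : r % 2 = 0 := Nat.even_iff.mp he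
          have := pcN_le (m + 1) (r / 2) (by rw [Nat.pow_succ] at hr; omega)
          omega
        · have h2 : r % 2 = 1 := Nat.odd_iff.mp ho
          have := ih (r / 2) (by rw [Nat.pow_succ] at hr; omega)
          omega

lemma pcN_pos (n : Nat) (h : 0 < n) : 0 < pcN n := by
  induction n using Nat.strong_induction_on with
  | _ n ih =>
      rw [pcN_rec n h]
      rcases Nat.eq_zero_or_pos (n % 2) with h2 | h2
      · have := ih (n / 2) (by omega) (by omega)
        omega
      · omega

lemma pcN_eq_zero_iff (n : Nat) : pcN n = 0 ↔ n = 0 := by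
  constructor
  · intro h
    by_contra hn
    have := pcN_pos n (by omega)
    omega
  · rintro rfl; exact pcN_zero

-- B-side: stable sort by popcount = concatenation of popcount buckets ------

lemma insertBy_append_left {α : Type} (before : α → α → Bool) (x : α) (as bs : List α)
    (h : ∀ y ∈ as, before x y = false) :
    PySem.List.insertBy before x (as ++ bs) = as ++ PySem.List.insertBy before x bs := by
  induction as with
  | nil => simp
  | cons a as ih =>
      simp only [List.cons_append, PySem.List.insertBy, h a (by simp), Bool.false_eq_true,
        if_false]
      rw [ih (fun y hy => h y (by simp [hy]))]

lemma insertBy_all {α : Type} (before : α → α → Bool) (x : α) (ys : List α)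
    (h : ∀ y ∈ ys, before x y = true) :
    PySem.List.insertBy before x ys = x :: ys := by
  cases ys with
  | nil => simp [PySem.List.insertBy]
  | cons y ys => simp [PySem.List.insertBy, h y (by simp)]

lemma insert_buckets (l : List Int) (x : Int) (K : Nat)
    (hK : PySem.Int.bitCount x < K) :
    PySem.List.insertBy (fun a b => decide (PySem.Int.bitCount a < PySem.Int.bitCount b)) x
        (((List.range K).map (fun b => l.filter (fun y => PySem.Int.bitCount y == b))).flatten) =
      (((List.range K).map (fun b => (l ++ [x]).filter (fun y => PySem.Int.bitCount y == b))).flatten) := by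
  set B := PySem.Int.bitCount x with hB
  have hfilters : ∀ b : Nat, (l ++ [x]).filter (fun y => PySem.Int.bitCount y == b) =
      l.filter (fun y => PySem.Int.bitCount y == b) ++ (if B = b then [x] else []) := by
    intro b
    rw [List.filter_append]
    congr 1
    by_cases hxb : PySem.Int.bitCount x = b
    · simp only [List.filter, hxb, beq_self_eq_true]
      rw [if_pos (by omega)]
    · have hf : (PySem.Int.bitCount x == b) = false := beq_eq_false_iff_ne.mpr hxb
      simp only [List.filter, hf]
      rw [if_neg (by omega)]
  have hsplit : K = (B + 1) + (K - (B + 1)) := by omega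
  rw [hsplit, List.range_add, List.map_append, List.map_append, List.flatten_append,
    List.flatten_append]
  rw [insertBy_append_left _ x _ _ (by
    intro y hy
    rcases List.mem_flatten.mp hy with ⟨lb, hlb, hylb⟩
    rcases List.mem_map.mp hlb with ⟨b, hb, rfl⟩
    have hble : b ≤ B := by
      have := List.mem_range.mp hb; omega
    have : PySem.Int.bitCount y = b := by
      have := List.mem_filter.mp hylb
      exact beq_iff_eq.mp this.2
    simp [this]; omega)]
  rw [insertBy_all _ x _ (by
    intro y hy
    rcases List.mem_flatten.mp hy with ⟨lb, hlb, hylb⟩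
    rcases List.mem_map.mp hlb with ⟨b, hb, rfl⟩
    rcases List.mem_map.mp hb with ⟨j, hj, rfl⟩
    have : PySem.Int.bitCount y = B + 1 + j := by
      have := List.mem_filter.mp hylb
      exact beq_iff_eq.mp this.2
    simp only [this, decide_eq_true_eq]
    omega)]
  have right_eq : List.map (fun b => (l ++ [x]).filter (fun y => PySem.Int.bitCount y == b))
        (List.map (fun j => B + 1 + j) (List.range (K - (B + 1)))) =
      List.map (fun b => l.filter (fun y => PySem.Int.bitCount y == b))
        (List.map (fun j => B + 1 + j) (List.range (K - (B + 1)))) := by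
    apply List.map_congr_left
    intro b hb
    rcases List.mem_map.mp hb with ⟨j, hj, rfl⟩
    rw [hfilters, if_neg (by omega), List.append_nil]
  have left_eq : List.map (fun b => (l ++ [x]).filter (fun y => PySem.Int.bitCount y == b))
        (List.range B) =
      List.map (fun b => l.filter (fun y => PySem.Int.bitCount y == b)) (List.range B) := by
    apply List.map_congr_left
    intro b hb
    rw [hfilters, if_neg (by have := List.mem_range.mp hb; omega), List.append_nil]
  rw [right_eq, List.range_succ, List.map_append, List.map_append, List.flatten_append,
    List.flatten_append, left_eq]
  have mid : List.map (fun b => (l ++ [x]).filter (fun y => PySem.Int.bitCount y == b)) [B] =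
      [l.filter (fun y => PySem.Int.bitCount y == B) ++ [x]] := by
    simp only [List.map_cons, List.map_nil]
    rw [hfilters B, if_pos rfl]
  rw [mid]
  simp [List.append_assoc]

lemma sorted_buckets (l : List Int) (K : Nat)
    (h : ∀ x ∈ l, PySem.Int.bitCount x < K) :
    PySem.List.sorted l (fun i => PySem.Int.bitCount i) =
      (((List.range K).map (fun b => l.filter (fun x => PySem.Int.bitCount x == b))).flatten) := by
  induction l using List.reverseRecOn with
  | nil => simp [PySem.List.sorted_eq_foldl_insertBy]
  | append_singleton l x ih =>
      rw [PySem.List.sorted_eq_foldl_insertBy, List.foldl_append, List.foldl_cons,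
        List.foldl_nil, ← PySem.List.sorted_eq_foldl_insertBy,
        ih (fun y hy => h y (by simp [hy]))]
      exact insert_buckets l x K (h x (by simp))

-- A-side loop invariant ----------------------------------------------------

lemma squares_get (j : Nat) (hj : j ≤ 17) :
    PySem.List.pyGetD pvSquares (j : Int) 0 = ((2 ^ j : Nat) : Int) := by
  interval_cases j <;> decide

lemma cOf_succ (M : Nat) : cOf (M + 1) = cOf M ++ [(pcN M : Int)] := by
  rw [cOf, cOf, List.range_succ]; simp

lemma maOf_getD (M b : Nat) (hb : b < 18) :
    (maOf M).getD b [] = if b = 0 then [] else bucketL M b := by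
  rw [maOf, PySem.List.getD_map_range _ _ _ _ hb]

lemma bucketL_succ (M b : Nat) :
    bucketL (M + 1) b = bucketL M b ++ (if pcN M = b then [(M : Int)] else []) := by
  simp only [bucketL, List.range_succ, List.filter_append, List.map_append]
  congr 1
  by_cases h : pcN M = b
  · rw [if_pos h]
    simp [List.filter, h]
  · rw [if_neg h]
    have hf : (pcN M == b) = false := beq_eq_false_iff_ne.mpr h
    simp [List.filter, hf]

lemma maOf_append (M b : Nat) (hb : pcN M = b) (hb1 : 1 ≤ b) (hb17 : b < 18) :
    pvAppendAt (maOf M) (b : Int) (M : Int) = maOf (M + 1) := by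
  rw [pvAppendAt, Int.toNat_natCast, maOf_getD M b hb17, if_neg (by omega)]
  apply List.ext_getElem
  · simp [maOf]
  · intro j hj hj'
    have hj18 : j < 18 := by simpa [maOf] using hj'
    rw [List.getElem_set]
    by_cases hjb : b = j
    · subst hjb
      rw [if_pos rfl]
      simp only [maOf, List.getElem_map, List.getElem_range]
      rw [if_neg (by omega), bucketL_succ, if_pos hb]
    · rw [if_neg hjb]
      simp only [maOf, List.getElem_map, List.getElem_range]
      by_cases hj0 : j = 0
      · simp [hj0]
      · rw [if_neg hj0, if_neg hj0, bucketL_succ, if_neg (by omega), List.append_nil]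

lemma step_lemma (i : Nat) (h4 : 4 ≤ i) (hi : i ≤ 131072) :
    answerStep pvSquares (stOf i) (i : Int) = stOf (i + 1) := by
  have e17 : (2 : Nat) ^ 17 = 131072 := by norm_num
  set L := Nat.log 2 (i - 1) with hLdef
  have hp1 : 2 ^ L ≤ i - 1 := Nat.pow_log_le_self 2 (by omega)
  have hp2 : i - 1 < 2 ^ (L + 1) := Nat.lt_pow_succ_log_self (by norm_num) _
  have hL16 : L ≤ 16 := by
    by_contra hc
    have : (2 : Nat) ^ 17 ≤ 2 ^ L := Nat.pow_le_pow_right (by norm_num) (by omega)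
    omega
  have hsq : PySem.List.pyGetD pvSquares (((L + 1 : Nat)) : Int) 0 = ((2 ^ (L + 1) : Nat) : Int) :=
    squares_get (L + 1) (by omega)
  simp only [answerStep, stOf]
  rw [← hLdef, hsq]
  by_cases hpow : i = 2 ^ (L + 1)
  · rw [if_pos (by exact_mod_cast hpow)]
    have hpc : pcN i = 1 := by rw [hpow]; exact pcN_pow (L + 1)
    have hlogi : Nat.log 2 ((i + 1) - 1) = L + 1 := by
      simp only [Nat.add_sub_cancel]
      rw [hpow]; exact Nat.log_pow (by norm_num) _
    refine Prod.ext ?_ (Prod.ext ?_ (Prod.ext ?_ ?_))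
    · show pvAppendAt (maOf i) 1 (i : Int) = maOf (i + 1)
      have := maOf_append i 1 hpc (by omega) (by omega)
      simpa using this
    · show cOf i ++ [1] = cOf (i + 1)
      rw [cOf_succ, hpc]; norm_num
    · show (1 : Int) = if i + 1 = 4 then 1 else ((i + 1 : Nat) : Int) - 2 ^ Nat.log 2 ((i + 1) - 1)
      rw [if_neg (by omega), hlogi]
      have : ((i + 1 : Nat) : Int) = ((2 ^ (L + 1) : Nat) : Int) + 1 := by exact_mod_cast congrArg (· + 1) hpow
      rw [this]
      push_cast
      ring
    · show (((L + 1 : Nat)) : Int) + 1 = ((Nat.log 2 ((i + 1) - 1) + 1 : Nat) : Int)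
      rw [hlogi]; push_cast; ring
  · rw [if_neg (by
      intro hc
      exact hpow (by exact_mod_cast hc))]
    have hi4 : i ≠ 4 := by
      rintro rfl
      have : Nat.log 2 3 = 1 := Nat.log_eq_of_pow_le_of_lt_pow (by norm_num) (by norm_num)
      rw [hLdef] at hpow
      simp only [this] at hpow
      norm_num at hpow
    have hlt : i < 2 ^ (L + 1) := by
      have : i ≤ 2 ^ (L + 1) := by omega
      omega
    set r := i - 2 ^ L with hrdef
    have hr1 : 1 ≤ r := by omega
    have hr2 : r < 2 ^ L := by
      have : (2 : Nat) ^ (L + 1) = 2 ^ L + 2 ^ L := by rw [Nat.pow_succ]; ring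
      omega
    have hlogi : Nat.log 2 ((i + 1) - 1) = L := by
      simp only [Nat.add_sub_cancel]
      exact Nat.log_eq_of_pow_le_of_lt_pow (by omega) hlt
    have hrefC : (if i = 4 then (1 : Int) else (i : Int) - 2 ^ Nat.log 2 (i - 1)) = ((r : Nat) : Int) := by
      rw [if_neg hi4, ← hLdef]
      have h2L : ((2 ^ L : Nat) : Int) = (2 : Int) ^ L := by push_cast; ring
      rw [hrdef]
      push_cast [Nat.cast_sub (by omega : 2 ^ L ≤ i)]
      omega
    have hread : PySem.List.pyGetD (cOf i) ((r : Nat) : Int) 0 = (pcN r : Int) := by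
      rw [PySem.List.pyGetD_natCast, cOf, PySem.List.getD_map_range _ _ _ _ (by omega)]
    have hpc : pcN i = 1 + pcN r := by
      have : i = 2 ^ L + r := by omega
      rw [this]; exact pcN_add_pow L r hr2
    have hpcle : pcN i ≤ 17 := by
      have := pcN_le L r hr2
      omega
    rw [hrefC, hread]
    refine Prod.ext ?_ (Prod.ext ?_ (Prod.ext ?_ ?_))
    · show pvAppendAt (maOf i) (1 + (pcN r : Int)) (i : Int) = maOf (i + 1)
      have hidx : (1 : Int) + (pcN r : Int) = ((pcN i : Nat) : Int) := by
        rw [hpc]; push_cast; ring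
      rw [hidx]
      exact maOf_append i (pcN i) rfl (by omega) (by omega)
    · show cOf i ++ [1 + (pcN r : Int)] = cOf (i + 1)
      rw [cOf_succ, hpc]; push_cast; ring_nf
    · show ((r : Nat) : Int) + 1 = if i + 1 = 4 then 1 else ((i + 1 : Nat) : Int) - 2 ^ Nat.log 2 ((i + 1) - 1)
      rw [if_neg (by omega), hlogi]
      have h2L : ((2 ^ L : Nat) : Int) = (2 : Int) ^ L := by push_cast; ring
      rw [hrdef]
      push_cast [Nat.cast_sub (by omega : 2 ^ L ≤ i)]
      omega
    · show (((L + 1 : Nat)) : Int) = ((Nat.log 2 ((i + 1) - 1) + 1 : Nat) : Int)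
      rw [hlogi]

lemma fold_inv (M : Nat) (h4 : 4 ≤ M) (hM : M ≤ 131073) :
    (PySem.List.pyRange 4 (M : Int)).foldl (answerStep pvSquares) (stOf 4) = stOf M := by
  induction M, h4 using Nat.le_induction with
  | base =>
      rw [show ((4 : Nat) : Int) = 4 by norm_num, PySem.List.pyRange_one]
      simp
  | succ M hM4 ih =>
      have hstep : (((M + 1 : Nat)) : Int) = (M : Int) + 1 := by push_cast; ring
      rw [hstep, PySem.List.pyRange_one_succ_right (by exact_mod_cast hM4.trans (by omega)),
        List.foldl_append, ih (by omega), List.foldl_cons, List.foldl_nil]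
      exact step_lemma M (by omega) (by omega)

lemma kloop_aux (N : Int) (L : Nat) (hlo : ((2 ^ L : Nat) : Int) ≤ N)
    (hup : N < ((2 ^ (L + 1) : Nat) : Int)) (hL17 : L ≤ 17) :
    ∀ d j : Nat, j + d = L + 1 → 2 ≤ j →
      answerKLoop N pvSquares ((j : Int) - 1) (PySem.List.pyRange (j : Int) 18) = (L : Int) := by
  intro d
  induction d with
  | zero =>
      intro j hj h2j
      have hj' : j = L + 1 := by omega
      subst hj'
      by_cases h17 : L = 17
      · subst h17
        rw [show ((18 : Nat) : Int) = 18 by norm_num, PySem.List.pyRange_one]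
        simp [answerKLoop]
      · rw [PySem.List.pyRange_one_cons (by exact_mod_cast (by omega : L + 1 < 18))]
        simp only [answerKLoop]
        rw [squares_get (L + 1) (by omega), if_neg (by omega)]
        push_cast
        ring
  | succ d ih =>
      intro j hj h2j
      have hjL : j ≤ L := by omega
      rw [PySem.List.pyRange_one_cons (by exact_mod_cast (by omega : j < 18))]
      simp only [answerKLoop]
      rw [squares_get j (by omega), if_pos (by
        have : (2 : Nat) ^ j ≤ 2 ^ L := Nat.pow_le_pow_right (by norm_num) hjL
        have : ((2 ^ j : Nat) : Int) ≤ ((2 ^ L : Nat) : Int) := by exact_mod_cast this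
        omega)]
      have h1 : (j : Int) - 1 + 1 = ((j + 1 : Nat) : Int) - 1 := by push_cast; ring
      have h2 : (j : Int) + 1 = ((j + 1 : Nat) : Int) := by push_cast; ring
      rw [h1, h2]
      exact ih (j + 1) (by omega) (by omega)

lemma k_eq (N : Int) (h4 : 4 ≤ N) (hN : N ≤ 131073) :
    answerKLoop N pvSquares 1 (PySem.List.pyRange 2 18) = (Nat.log 2 N.toNat : Int) := by
  set M := N.toNat with hM
  have hNM : N = (M : Int) := by omega
  have hM4 : 4 ≤ M := by omega
  have hp1 : 2 ^ Nat.log 2 M ≤ M := Nat.pow_log_le_self 2 (by omega)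
  have hp2 : M < 2 ^ (Nat.log 2 M + 1) := Nat.lt_pow_succ_log_self (by norm_num) _
  have hL17 : Nat.log 2 M ≤ 17 := by
    by_contra hc
    have : (2 : Nat) ^ 18 ≤ 2 ^ Nat.log 2 M := Nat.pow_le_pow_right (by norm_num) (by omega)
    have e18 : (2 : Nat) ^ 18 = 262144 := by norm_num
    omega
  have hL2 : 2 ≤ Nat.log 2 M := by
    rcases Nat.lt_or_ge (Nat.log 2 M) 2 with hc | hc
    · exfalso
      have : (2 : Nat) ^ Nat.log 2 M ≤ 2 ^ 1 := Nat.pow_le_pow_right (by norm_num) (by omega)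
      omega
    · exact hc
  have := kloop_aux N (Nat.log 2 M)
    (by rw [hNM]; exact_mod_cast hp1)
    (by rw [hNM]; exact_mod_cast hp2) hL17 (Nat.log 2 M - 1) 2 (by omega) (by omega)
  simpa using this

lemma bucketL_zero (M : Nat) (hM : 1 ≤ M) : bucketL M 0 = [(0 : Int)] := by
  obtain ⟨M', rfl⟩ : ∃ M', M = M' + 1 := ⟨M - 1, by omega⟩
  rw [bucketL, List.range_succ_eq_map]
  rw [List.filter_cons_of_pos (by decide)]
  rw [List.filter_eq_nil_iff.mpr (by
    intro a ha
    rcases List.mem_map.mp ha with ⟨j, hj, rfl⟩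
    have : pcN (Nat.succ j) ≠ 0 := by
      intro hc
      have := (pcN_eq_zero_iff (Nat.succ j)).mp hc
      omega
    simpa using this)]
  simp

lemma bucketL_empty (M b L : Nat) (hML : M < 2 ^ (L + 1)) (hb : L < b) : bucketL M b = [] := by
  rw [bucketL, List.filter_eq_nil_iff.mpr (by
    intro n hn
    have hn' : n < M := List.mem_range.mp hn
    have : pcN n ≤ L := pcN_le_pred L n (by omega)
    simp only [beq_iff_eq]
    omega)]
  simp

lemma init_state_eq :
    ((pvAppendAt (pvAppendAt (pvAppendAt ((List.range 18).foldl
          (fun acc _ => acc ++ [([] : List Int)]) []) 1 1) 1 2) 2 3),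
      ([0, 1, 1, 2] : List Int), (1 : Int), (2 : Int)) = stOf 4 := by
  have hlog3 : Nat.log 2 3 = 1 := Nat.log_eq_of_pow_le_of_lt_pow (by norm_num) (by norm_num)
  simp only [stOf, hlog3]
  refine Prod.ext ?_ (Prod.ext ?_ (Prod.ext ?_ ?_))
  · decide
  · decide
  · norm_num
  · norm_num

-- ===== VERDICT (by name: the statement is the Claim_ definition above) =====
theorem answer_spec : Claim_equal_answer := by
  unfold Claim_equal_answer
  intro N _hD hP
  unfold Spec_answer
  unfold Pre_answer at hP
  by_cases h3 : N ≤ 3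
  · by_cases h0 : N ≤ 0
    · have h00 : (N - 0).toNat = 0 := by omega
      have hr : PySem.List.pyRange 0 N = [] := by
        rw [PySem.List.pyRange_one, h00]
        simp
      simp only [answer, answer_alt, if_pos h3, hr]
      rfl
    · have : N = 1 ∨ N = 2 ∨ N = 3 := by omega
      rcases this with rfl | rfl | rfl <;> decide
  · set M := N.toNat with hMdef
    have hNM : N = (M : Int) := by omega
    have hM4 : 4 ≤ M := by omega
    have hMle : M ≤ 131073 := by omega
    set L := Nat.log 2 M with hLdef
    have hp1 : 2 ^ L ≤ M := Nat.pow_log_le_self 2 (by omega)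
    have hp2 : M < 2 ^ (L + 1) := Nat.lt_pow_succ_log_self (by norm_num) _
    have hL2 : 2 ≤ L := by
      rcases Nat.lt_or_ge L 2 with hc | hc
      · exfalso
        have : (2 : Nat) ^ (L + 1) ≤ 2 ^ 2 := Nat.pow_le_pow_right (by norm_num) (by omega)
        omega
      · exact hc
    have hL17 : L ≤ 17 := by
      by_contra hc
      have : (2 : Nat) ^ 18 ≤ 2 ^ L := Nat.pow_le_pow_right (by norm_num) (by omega)
      have e18 : (2 : Nat) ^ 18 = 262144 := by norm_num
      omega
    -- A side
    have hA : answer N = 0 :: ((List.range L).map (fun k => bucketL M (1 + k))).flatten := by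
      simp only [answer]
      rw [if_neg (show ¬ N ≤ 3 by omega)]
      rw [k_eq N (by omega) hP, ← hMdef, ← hLdef]
      rw [hNM, init_state_eq, fold_inv M hM4 hMle]
      rw [PySem.List.foldl_append_eq_flatMap]
      have hrange : PySem.List.pyRange 1 ((L : Int) + 1) =
          (List.range L).map (fun (k : Nat) => 1 + (k : Int)) := by
        rw [PySem.List.pyRange_one]
        simp
      rw [hrange, List.flatMap_map, List.flatMap_def]
      have hcong : List.map (fun (a : Nat) => PySem.List.pyGetD (stOf M).1 (1 + (a : Int)) [])
          (List.range L) = List.map (fun k => bucketL M (1 + k)) (List.range L) := by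
        apply List.map_congr_left
        intro k hk
        have hkL : k < L := List.mem_range.mp hk
        have hc : (1 : Int) + (k : Int) = ((1 + k : Nat) : Int) := by push_cast; ring
        show PySem.List.pyGetD (maOf M) (1 + (k : Int)) [] = bucketL M (1 + k)
        rw [hc, PySem.List.pyGetD_natCast, maOf_getD M (1 + k) (by omega), if_neg (by omega)]
      rw [hcong]
      rfl
    -- B side
    have hB : answer_alt N = ((List.range 18).map (fun b => bucketL M b)).flatten := by
      rw [answer_alt, sorted_buckets _ 18 (by
        intro x hx
        rcases (PySem.List.mem_pyRange_one).mp hx with ⟨hx0, hxN⟩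
        have hxn : x = ((x.toNat : Nat) : Int) := by omega
        rw [hxn]
        show pcN x.toNat < 18
        have : pcN x.toNat ≤ 17 := pcN_le_pred 17 x.toNat (by
          have e : (2 : Nat) ^ 18 = 262144 := by norm_num
          omega)
        omega)]
      rw [hNM, PySem.List.pyRange_zero]
      congr 1
      apply List.map_congr_left
      intro b _
      rw [show ((M : Int)).toNat = M by omega, List.filter_map, bucketL]
      congr 1
    -- bridge: the 18-bucket concatenation is [0] followed by buckets 1..L
    have key : ((List.range 18).map (fun b => bucketL M b)).flatten =
        bucketL M 0 ++ ((List.range 17).map (fun k => bucketL M (1 + k))).flatten := by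
      rw [show List.range 18 = List.range 1 ++ List.map (fun x => 1 + x) (List.range 17) by
        rw [← List.range_add]]
      rw [List.map_append, List.flatten_append, List.range_one, List.map_map]
      simp only [List.map_cons, List.map_nil, List.flatten_cons, List.flatten_nil,
        List.append_nil]
      exact congrArg (fun t => bucketL M 0 ++ List.flatten t)
        (List.map_congr_left (fun x _ => rfl))
    have key2 : ((List.range 17).map (fun k => bucketL M (1 + k))).flatten =
        ((List.range L).map (fun k => bucketL M (1 + k))).flatten := by
      rw [show List.range 17 = List.range L ++ List.map (fun x => L + x) (List.range (17 - L)) by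
        rw [← List.range_add]; congr 1; omega]
      rw [List.map_append, List.flatten_append]
      have htail : List.map (fun k => bucketL M (1 + k)) (List.map (fun x => L + x) (List.range (17 - L))) =
          List.map (fun _ => ([] : List Int)) (List.range (17 - L)) := by
        rw [List.map_map]
        apply List.map_congr_left
        intro j hj
        exact bucketL_empty M (1 + (L + j)) L hp2 (by omega)
      rw [htail]
      simp
    rw [hA, hB, key, key2, bucketL_zero M (by omega)]
    rfl
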